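-- pv_equiv track=rewrite | github.com/max-morris/javalineer | src/main/java/edu/lsu/cct/javalineer/parts.py | mkbody
-- ===== SOURCE A (Python) =====
-- def mkbody(n,p=1,nindent=0):
--     indent = " "*nindent
--     if p > n:
--         return "return chunkTask.apply("+(", ".join(["lv"+str(j) for j in range(1,n+1)]))+");"
--     else:
--         body = f"""
-- {indent}    return pi1.getUnderlying().runPartitionedReadOnly(nChunks, lv{p} -> {{
-- {indent}        {mkbody(n,p+1,nindent+4)}
-- {indent}    }});
-- """
--     if p == 1:
--         return body.rstrip()
--     else:
--         return body.strip()
-- ===== SOURCE B (Python) =====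
-- def mkbody(n, p=1, nindent=0):
--     # Iterative: build the string from the innermost base call outward.
--     s = "return chunkTask.apply(" + ", ".join("lv" + str(j) for j in range(1, n + 1)) + ");"
--     for q in range(n, p - 1, -1):
--         ind = " " * (nindent + 4 * (q - p))
--         s = ("return pi1.getUnderlying().runPartitionedReadOnly(nChunks, lv" + str(q)
--              + " -> {\n" + ind + "        " + s + "\n" + ind + "    });")
--         if q == 1:
--             s = "\n" + ind + "    " + s
--     return s
-- ===== Notes on version B (the rewrite author's own statement) =====
-- stated objective: alternative
-- what changed: B replaces A's recursion (which re-strips whitespace off every recursively built layer with strip/rstrip) by a single loop that builds the string from the innermost chunkTask.apply call outward, emitting each layer already in its final stripped form so no strip/rstrip is needed.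
import Mathlib
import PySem

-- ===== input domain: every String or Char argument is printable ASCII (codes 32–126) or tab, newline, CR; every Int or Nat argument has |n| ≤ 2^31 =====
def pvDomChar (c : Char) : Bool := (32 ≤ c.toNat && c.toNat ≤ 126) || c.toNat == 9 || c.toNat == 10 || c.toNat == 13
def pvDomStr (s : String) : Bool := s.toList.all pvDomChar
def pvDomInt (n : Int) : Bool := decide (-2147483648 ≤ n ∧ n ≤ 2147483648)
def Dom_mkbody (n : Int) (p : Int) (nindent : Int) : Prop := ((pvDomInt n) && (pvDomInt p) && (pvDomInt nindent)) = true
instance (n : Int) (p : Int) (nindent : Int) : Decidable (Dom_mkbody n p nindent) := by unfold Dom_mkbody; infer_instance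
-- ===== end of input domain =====

-- B builds the nested code string iteratively from the innermost base call outward instead of recursing;
-- objective: alternative decomposition (no strip/rstrip needed), same cost.

-- the base string "return chunkTask.apply(lv1, …, lvn);" shared literally by both Pythons
def pvBaseChars (n : Int) : List Char :=
  "return chunkTask.apply(".toList
    ++ PySem.Chars.join ", ".toList
         ((PySem.List.pyRange 1 (n + 1) 1).map (fun j => "lv".toList ++ PySem.Int.toChars j))
    ++ ");".toList

-- ===== PORT A =====
-- A over List Char (strings are ported through PySem.Chars; String.ofList at the end)
def mkbodyChars (n : Int) (p : Int) (nindent : Int) : List Char :=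
  let indent := List.replicate nindent.toNat ' '   -- " " * nindent (negative → empty, as in Python)
  if p > n then
    pvBaseChars n
  else
    let body :=
      '\n' :: (indent
        ++ "    return pi1.getUnderlying().runPartitionedReadOnly(nChunks, lv".toList
        ++ PySem.Int.toChars p ++ " -> {\n".toList
        ++ indent ++ "        ".toList
        ++ mkbodyChars n (p + 1) (nindent + 4)
        ++ '\n' :: (indent ++ "    });\n".toList))
    if p = 1 then PySem.Chars.rstrip body else PySem.Chars.strip body
termination_by (n + 1 - p).toNat
decreasing_by omega

def mkbody (n : Int) (p : Int) (nindent : Int) : String :=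
  String.ofList (mkbodyChars n p nindent)

-- ===== PORT B =====
-- one loop iteration: wrap the accumulated string s for level q (indent of level q)
def pvWrap (p : Int) (nindent : Int) (q : Int) (s : List Char) : List Char :=
  let ind := List.replicate (nindent + 4 * (q - p)).toNat ' '
  let w := "return pi1.getUnderlying().runPartitionedReadOnly(nChunks, lv".toList
            ++ PySem.Int.toChars q ++ " -> {\n".toList
            ++ ind ++ "        ".toList ++ s
            ++ '\n' :: (ind ++ "    });".toList)
  if q = 1 then '\n' :: (ind ++ "    ".toList ++ w) else w

-- the loop 'for q in range(n, p-1, -1)' as recursion on q descending to p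
def pvAltGo (p : Int) (nindent : Int) (q : Int) (s : List Char) : List Char :=
  if q < p then s
  else pvAltGo p nindent (q - 1) (pvWrap p nindent q s)
termination_by (q + 1 - p).toNat
decreasing_by omega

def mkbody_alt (n : Int) (p : Int) (nindent : Int) : String :=
  String.ofList (pvAltGo p nindent n (pvBaseChars n))

-- ===== PRECONDITION & SPEC =====
-- Pre_ excludes only inputs on which CPython's A raises RecursionError: the recursion descends
-- n - p + 1 levels and overflows the interpreter's recursion limit near depth 1000; the exact
-- overflow point is interpreter- and stack-dependent, so the bound is conservative (n - p ≤ 900)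
-- and a thin band of still-returning depths 901..~995 is excluded with it (A and B agree there too).
def Pre_mkbody (n : Int) (p : Int) (nindent : Int) : Prop := n - p ≤ 900
instance (n : Int) (p : Int) (nindent : Int) : Decidable (Pre_mkbody n p nindent) := by unfold Pre_mkbody; infer_instance

def pvWitness_mkbody : Int × Int × Int := (3, 1, 0)

def Spec_mkbody (n : Int) (p : Int) (nindent : Int) (out : String) : Prop := out = mkbody_alt n p nindent
instance (n : Int) (p : Int) (nindent : Int) (out : String) : Decidable (Spec_mkbody n p nindent out) := by unfold Spec_mkbody; infer_instance

-- ===== CLAIM (what is proved, stated in full; the proofs are below) =====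
def Claim_equal_mkbody : Prop := ∀ (n : Int) (p : Int) (nindent : Int), Dom_mkbody n p nindent → Pre_mkbody n p nindent → Spec_mkbody n p nindent (mkbody n p nindent)

-- ===== LEMMAS AND PROOFS =====

-- primitive strip facts
theorem pvLstrip_sp (s : List Char) : PySem.Chars.lstrip (' ' :: s) = PySem.Chars.lstrip s := by
  simp [PySem.Chars.lstrip, show PySem.Chars.isspace ' ' = true from by decide]

theorem pvLstrip_nl (s : List Char) : PySem.Chars.lstrip ('\n' :: s) = PySem.Chars.lstrip s := by
  simp [PySem.Chars.lstrip, show PySem.Chars.isspace '\n' = true from by decide]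

theorem pvLstrip_r (s : List Char) : PySem.Chars.lstrip ('r' :: s) = 'r' :: s := by
  simp [PySem.Chars.lstrip, show PySem.Chars.isspace 'r' = false from by decide]

theorem pvLstrip_rep (k : Nat) (s : List Char) :
    PySem.Chars.lstrip (List.replicate k ' ' ++ s) = PySem.Chars.lstrip s := by
  induction k with
  | zero => rfl
  | succ k ih => simpa [List.replicate_succ, pvLstrip_sp] using ih

theorem pvRstrip_app (s t : List Char) (h : PySem.Chars.rstrip t ≠ []) :
    PySem.Chars.rstrip (s ++ t) = s ++ PySem.Chars.rstrip t := by
  have h' : (List.dropWhile PySem.Chars.isspace t.reverse) ≠ [] := by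
    intro he; apply h; simp [PySem.Chars.rstrip, he]
  simp [PySem.Chars.rstrip, List.reverse_append, List.dropWhile_append,
        List.isEmpty_iff, h']

theorem pvRstrip_cons (c : Char) (t : List Char) (h : PySem.Chars.rstrip t ≠ []) :
    PySem.Chars.rstrip (c :: t) = c :: PySem.Chars.rstrip t := by
  have := pvRstrip_app [c] t h
  simpa using this

theorem pvRstrip_base : PySem.Chars.rstrip ("    });\n".toList) = "    });".toList := by decide

theorem pvWrap_shift (p nindent q : Int) (s : List Char) :
    pvWrap (p + 1) (nindent + 4) q s = pvWrap p nindent q s := by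
  have h : nindent + 4 + 4 * (q - (p + 1)) = nindent + 4 * (q - p) := by ring
  simp only [pvWrap, h]

theorem pvAltGo_peel (p m : Int) :
    ∀ (k : Nat) (q : Int) (s : List Char), (q - p).toNat = k → p ≤ q →
      pvAltGo p m q s = pvWrap p m p (pvAltGo (p + 1) (m + 4) q s) := by
  intro k
  induction k with
  | zero =>
    intro q s hk hpq
    have hq : q = p := by omega
    subst hq
    rw [pvAltGo, if_neg (by omega), pvAltGo, if_pos (by omega)]
    rw [pvAltGo, if_pos (by omega)]
  | succ k ih =>
    intro q s hk hpq
    have hq : p < q := by omega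
    rw [pvAltGo, if_neg (by omega)]
    rw [ih (q - 1) (pvWrap p m q s) (by omega) (by omega)]
    conv_rhs => rw [pvAltGo, if_neg (by omega)]
    rw [pvWrap_shift]

theorem pvLstrip_lit (rest : List Char) :
    PySem.Chars.lstrip ("    return pi1.getUnderlying().runPartitionedReadOnly(nChunks, lv".toList ++ rest)
      = "return pi1.getUnderlying().runPartitionedReadOnly(nChunks, lv".toList ++ rest := by
  have h1 : ("    return pi1.getUnderlying().runPartitionedReadOnly(nChunks, lv".toList ++ rest)
      = ' ' :: (' ' :: (' ' :: (' ' :: ("return pi1.getUnderlying().runPartitionedReadOnly(nChunks, lv".toList ++ rest)))) := rfl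
  have h2 : ("return pi1.getUnderlying().runPartitionedReadOnly(nChunks, lv".toList ++ rest)
      = 'r' :: ("eturn pi1.getUnderlying().runPartitionedReadOnly(nChunks, lv".toList ++ rest) := rfl
  rw [h1, pvLstrip_sp, pvLstrip_sp, pvLstrip_sp, pvLstrip_sp, h2, pvLstrip_r, ← h2]

theorem pvRest (cp rep inner : List Char) :
    PySem.Chars.rstrip (cp ++ (" -> {\n".toList ++ (rep ++ ("        ".toList ++ (inner ++ ('\n' :: (rep ++ "    });\n".toList)))))))
      = cp ++ (" -> {\n".toList ++ (rep ++ ("        ".toList ++ (inner ++ ('\n' :: (rep ++ "    });".toList)))))) := by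
  have e0 : PySem.Chars.rstrip (rep ++ "    });\n".toList) = rep ++ "    });".toList := by
    rw [pvRstrip_app _ _ (by rw [pvRstrip_base]; decide), pvRstrip_base]
  have e1 : PySem.Chars.rstrip ('\n' :: (rep ++ "    });\n".toList))
      = '\n' :: (rep ++ "    });".toList) := by
    rw [pvRstrip_cons _ _ (by rw [e0]; simp), e0]
  have e2 : PySem.Chars.rstrip (inner ++ ('\n' :: (rep ++ "    });\n".toList)))
      = inner ++ ('\n' :: (rep ++ "    });".toList)) := by
    rw [pvRstrip_app _ _ (by rw [e1]; simp), e1]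
  have e3 : PySem.Chars.rstrip ("        ".toList ++ (inner ++ ('\n' :: (rep ++ "    });\n".toList))))
      = "        ".toList ++ (inner ++ ('\n' :: (rep ++ "    });".toList))) := by
    rw [pvRstrip_app _ _ (by rw [e2]; simp), e2]
  have e4 : PySem.Chars.rstrip (rep ++ ("        ".toList ++ (inner ++ ('\n' :: (rep ++ "    });\n".toList)))))
      = rep ++ ("        ".toList ++ (inner ++ ('\n' :: (rep ++ "    });".toList)))) := by
    rw [pvRstrip_app _ _ (by rw [e3]; simp), e3]
  have e5 : PySem.Chars.rstrip (" -> {\n".toList ++ (rep ++ ("        ".toList ++ (inner ++ ('\n' :: (rep ++ "    });\n".toList))))))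
      = " -> {\n".toList ++ (rep ++ ("        ".toList ++ (inner ++ ('\n' :: (rep ++ "    });".toList))))) := by
    rw [pvRstrip_app _ _ (by rw [e4]; simp), e4]
  rw [pvRstrip_app _ _ (by rw [e5]; simp), e5]

theorem pvRest_ne (cp rep inner : List Char) :
    cp ++ (" -> {\n".toList ++ (rep ++ ("        ".toList ++ (inner ++ ('\n' :: (rep ++ "    });".toList)))))) ≠ [] := by
  simp

theorem pvStrip_shape (k : Nat) (rest rest' : List Char)
    (hr : PySem.Chars.rstrip rest = rest') (hne : rest' ≠ []) :
    PySem.Chars.strip ('\n' :: (List.replicate k ' ' ++ ("    return pi1.getUnderlying().runPartitionedReadOnly(nChunks, lv".toList ++ rest)))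
      = "return pi1.getUnderlying().runPartitionedReadOnly(nChunks, lv".toList ++ rest' := by
  simp only [PySem.Chars.strip, pvLstrip_nl, pvLstrip_rep, pvLstrip_lit]
  rw [pvRstrip_app _ _ (by rw [hr]; exact hne), hr]

theorem pvRstrip_shape (k : Nat) (rest rest' : List Char)
    (hr : PySem.Chars.rstrip rest = rest') (hne : rest' ≠ []) :
    PySem.Chars.rstrip ('\n' :: (List.replicate k ' ' ++ ("    return pi1.getUnderlying().runPartitionedReadOnly(nChunks, lv".toList ++ rest)))
      = '\n' :: (List.replicate k ' ' ++ ("    return pi1.getUnderlying().runPartitionedReadOnly(nChunks, lv".toList ++ rest')) := by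
  have f1 : PySem.Chars.rstrip ("    return pi1.getUnderlying().runPartitionedReadOnly(nChunks, lv".toList ++ rest)
      = "    return pi1.getUnderlying().runPartitionedReadOnly(nChunks, lv".toList ++ rest' := by
    rw [pvRstrip_app _ _ (by rw [hr]; exact hne), hr]
  have f2 : PySem.Chars.rstrip (List.replicate k ' ' ++ ("    return pi1.getUnderlying().runPartitionedReadOnly(nChunks, lv".toList ++ rest))
      = List.replicate k ' ' ++ ("    return pi1.getUnderlying().runPartitionedReadOnly(nChunks, lv".toList ++ rest') := by
    rw [pvRstrip_app _ _ (by rw [f1]; simp), f1]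
  rw [pvRstrip_cons _ _ (by rw [f2]; simp), f2]

theorem pvMain : ∀ (k : Nat) (n p m : Int), (n + 1 - p).toNat = k →
    mkbodyChars n p m = pvAltGo p m n (pvBaseChars n) := by
  intro k
  induction k with
  | zero =>
    intro n p m hk
    rw [mkbodyChars, if_pos (by omega : p > n), pvAltGo, if_pos (by omega : n < p)]
  | succ k ih =>
    intro n p m hk
    have hpn : p ≤ n := by omega
    rw [pvAltGo_peel p m (n - p).toNat n (pvBaseChars n) rfl hpn]
    rw [← ih n (p + 1) (m + 4) (by omega)]
    rw [mkbodyChars]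
    rw [if_neg (by omega : ¬ p > n)]
    simp only [pvWrap]
    have hm : m + 4 * (p - p) = m := by ring
    rw [hm]
    have hsplit : ∀ x : List Char,
        ("    ".toList ++ ("return pi1.getUnderlying().runPartitionedReadOnly(nChunks, lv".toList ++ x) : List Char)
          = "    return pi1.getUnderlying().runPartitionedReadOnly(nChunks, lv".toList ++ x := fun _ => rfl
    by_cases hp1 : p = 1
    · rw [if_pos hp1, if_pos hp1]
      simp only [List.append_assoc]
      rw [hsplit]
      exact pvRstrip_shape m.toNat
        (PySem.Int.toChars p ++ (" -> {\n".toList ++ (List.replicate m.toNat ' ' ++ ("        ".toList ++ (mkbodyChars n (p + 1) (m + 4) ++ ('\n' :: (List.replicate m.toNat ' ' ++ "    });\n".toList)))))))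
        _ (pvRest _ _ _) (pvRest_ne _ _ _)
    · rw [if_neg hp1, if_neg hp1]
      simp only [List.append_assoc]
      exact pvStrip_shape m.toNat
        (PySem.Int.toChars p ++ (" -> {\n".toList ++ (List.replicate m.toNat ' ' ++ ("        ".toList ++ (mkbodyChars n (p + 1) (m + 4) ++ ('\n' :: (List.replicate m.toNat ' ' ++ "    });\n".toList)))))))
        _ (pvRest _ _ _) (pvRest_ne _ _ _)

theorem pvSpec_aux (n p m : Int) : mkbody n p m = mkbody_alt n p m :=
  congrArg String.ofList (pvMain (n + 1 - p).toNat n p m rfl)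

-- ===== VERDICT (by name: the statement is the Claim_ definition above) =====
theorem mkbody_spec : Claim_equal_mkbody := by
  intro n p nindent _ _
  unfold Spec_mkbody
  exact pvSpec_aux n p nindent
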